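-- pv_equiv track=rewrite | github.com/huseKivrak/kanka | project/letters/utils/google_api.py | estimate_delivery_days
-- ===== SOURCE A (Python) =====
-- def estimate_delivery_days(distance):
--     """
--     Just returns an integer between 1-5 based on distance value.
--
--     Separated out for easy updating/replacing later.
--     """
--
--     delivery_days = [
--         (50, 1),
--         (300, 2),
--         (1000, 3),
--         (2000, 4),
--     ]
--
--     for max_distance, days in delivery_days:
--         if distance <= max_distance:
--             return days
--
--     return 5
-- ===== SOURCE B (Python) =====
-- import bisect
--
-- _THRESHOLDS = [50, 300, 1000, 2000]
-- _DAYS = [1, 2, 3, 4, 5]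
--
-- def estimate_delivery_days(distance):
--     """
--     Just returns an integer between 1-5 based on distance value.
--
--     Separated out for easy updating/replacing later.
--     """
--     return _DAYS[bisect.bisect_left(_THRESHOLDS, distance)]
-- ===== Notes on version B (the rewrite author's own statement) =====
-- stated objective: idiomatic
-- what changed: Replaces the linear scan over (threshold, days) pairs with a bisect_left binary-search index into a sorted thresholds list and a parallel days table.
import Mathlib
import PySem

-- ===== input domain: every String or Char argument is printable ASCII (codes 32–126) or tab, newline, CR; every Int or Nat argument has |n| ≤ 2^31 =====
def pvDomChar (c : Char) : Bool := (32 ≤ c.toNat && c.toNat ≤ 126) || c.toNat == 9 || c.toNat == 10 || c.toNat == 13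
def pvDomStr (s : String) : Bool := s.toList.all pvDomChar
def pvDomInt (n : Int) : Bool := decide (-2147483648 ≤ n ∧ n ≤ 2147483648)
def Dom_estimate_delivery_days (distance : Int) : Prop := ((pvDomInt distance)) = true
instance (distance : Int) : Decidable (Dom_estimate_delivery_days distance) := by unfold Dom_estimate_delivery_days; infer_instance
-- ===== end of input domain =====

-- B replaces A's linear scan over (threshold, days) pairs with a bisect_left
-- index into a sorted thresholds list and a parallel days table (idiomatic).


-- ===== PORT A =====
-- the for-loop with early return, as structural recursion over the pair list
def edd_scan (pairs : List (Int × Int)) (distance : Int) : Int :=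
  match pairs with
  | [] => 5
  | (max_distance, days) :: rest =>
      if distance ≤ max_distance then days else edd_scan rest distance

def estimate_delivery_days (distance : Int) : Int :=
  edd_scan [(50, 1), (300, 2), (1000, 3), (2000, 4)] distance

-- ===== PORT B =====
-- bisect.bisect_left on a sorted list: binary search for the insertion point
def bisectLeft (xs : List Int) (x : Int) : Nat :=
  match xs with
  | [] => 0
  | y :: rest => if y < x then bisectLeft rest x + 1 else 0

def eddThresholds : List Int := [50, 300, 1000, 2000]
def eddDays : List Int := [1, 2, 3, 4, 5]

def estimate_delivery_days_alt (distance : Int) : Int :=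
  eddDays.getD (bisectLeft eddThresholds distance) 0

-- ===== PRECONDITION & SPEC =====
def Spec_estimate_delivery_days (distance : Int) (out : Int) : Prop := out = estimate_delivery_days_alt distance
instance (distance : Int) (out : Int) : Decidable (Spec_estimate_delivery_days distance out) := by unfold Spec_estimate_delivery_days; infer_instance

-- ===== CLAIM (what is proved, stated in full; the proofs are below) =====
def Claim_equal_estimate_delivery_days : Prop := ∀ (distance : Int), Dom_estimate_delivery_days distance → Spec_estimate_delivery_days distance (estimate_delivery_days distance)

-- ===== LEMMAS AND PROOFS =====

-- ===== VERDICT (by name: the statement is the Claim_ definition above) =====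
theorem estimate_delivery_days_spec : Claim_equal_estimate_delivery_days := by
  intro d _
  unfold Spec_estimate_delivery_days estimate_delivery_days estimate_delivery_days_alt
  simp only [edd_scan, bisectLeft, eddThresholds, eddDays]
  split_ifs <;> simp_all <;> omega
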